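-- pv_equiv track=rewrite | github.com/asdf-a11/TextRenderer | test2.py | merge_small_lines
-- ===== SOURCE A (Python) =====
-- def merge_small_lines(line_indexes, height_threshold=15):
--     if not line_indexes:
--         return []
--
--     merged = []
--     # Start with the first line
--     curr_start, curr_end = line_indexes[0]
--
--     for i in range(1, len(line_indexes)):
--         next_start, next_end = line_indexes[i]
--
--         # Calculate gap between lines and height of the current segment
--         gap = next_start - curr_end
--         curr_height = curr_end - curr_start
--
--         # Merge if the line is very thin (accents) OR if they are very close
--         if curr_height < height_threshold or gap < 5:
--             curr_end = next_end # Extend the current line down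
--         else:
--             merged.append((curr_start, curr_end))
--             curr_start, curr_end = next_start, next_end
--
--     merged.append((curr_start, curr_end)) # Add the last one
--     return merged
-- ===== SOURCE B (Python) =====
-- def merge_small_lines(line_indexes, height_threshold=15):
--     # Two-level scan: outer loop emits one merged group per iteration; the
--     # inner scan finds where the current group ends before anything is built.
--     out = []
--     n = len(line_indexes)
--     i = 0
--     while i < n:
--         group_start = line_indexes[i][0]
--         j = i
--         while j + 1 < n and (line_indexes[j][1] - group_start < height_threshold
--                              or line_indexes[j + 1][0] - line_indexes[j][1] < 5):
--             j += 1
--         out.append((group_start, line_indexes[j][1]))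
--         i = j + 1
--     return out
-- ===== Notes on version B (the rewrite author's own statement) =====
-- stated objective: alternative
-- what changed: B replaces A's single pass carrying curr_start/curr_end with a trailing flush by a two-level scan: an outer loop that emits exactly one merged group per iteration and an inner scan that first locates the group's last element before the pair is appended.
import Mathlib
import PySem

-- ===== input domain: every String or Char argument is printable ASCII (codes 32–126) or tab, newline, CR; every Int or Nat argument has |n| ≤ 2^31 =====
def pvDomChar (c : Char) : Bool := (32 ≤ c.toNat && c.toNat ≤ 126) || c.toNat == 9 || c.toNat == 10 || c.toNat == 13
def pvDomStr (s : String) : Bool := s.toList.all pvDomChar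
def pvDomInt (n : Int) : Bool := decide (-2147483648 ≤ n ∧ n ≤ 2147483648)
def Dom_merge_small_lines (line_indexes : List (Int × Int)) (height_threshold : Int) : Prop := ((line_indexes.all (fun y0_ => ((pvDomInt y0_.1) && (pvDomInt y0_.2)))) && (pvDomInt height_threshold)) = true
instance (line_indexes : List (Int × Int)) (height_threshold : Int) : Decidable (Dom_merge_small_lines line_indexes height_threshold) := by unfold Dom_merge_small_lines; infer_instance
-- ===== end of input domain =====

-- B replaces A's single pass with a carried current-segment accumulator by a two-level scan:
-- an outer loop that emits one merged group per iteration, with an inner scan that first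
-- finds where the group ends (objective: alternative decomposition, same cost).

-- ===== PORT A =====
-- A: seed with first pair, loop over the rest carrying (merged, curr_start, curr_end), flush at end
def merge_small_lines (line_indexes : List (Int × Int)) (height_threshold : Int) : List (Int × Int) :=
  match line_indexes with
  | [] => []
  | (cs, ce) :: rest =>
    let st := rest.foldl (fun (st : List (Int × Int) × Int × Int) next =>
      let merged := st.1
      let curr_start := st.2.1
      let curr_end := st.2.2
      let gap := next.1 - curr_end
      let curr_height := curr_end - curr_start
      if curr_height < height_threshold ∨ gap < 5 then
        (merged, curr_start, next.2)
      else
        (merged ++ [(curr_start, curr_end)], next.1, next.2)) ([], cs, ce)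
    st.1 ++ [(st.2.1, st.2.2)]

-- ===== PORT B =====
-- B's inner scan: given the group's start, the end of the element reached so far, and the
-- remaining elements, advance while the merge condition holds; return the group's end and
-- the elements after the group.
def pvGroupEnd (h gs prev_end : Int) (rest : List (Int × Int)) : Int × List (Int × Int) :=
  match rest with
  | [] => (prev_end, [])
  | (s, e) :: t =>
    if prev_end - gs < h ∨ s - prev_end < 5 then pvGroupEnd h gs e t
    else (prev_end, (s, e) :: t)

theorem pvGroupEnd_len (h gs prev_end : Int) (rest : List (Int × Int)) :
    (pvGroupEnd h gs prev_end rest).2.length ≤ rest.length := by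
  induction rest generalizing prev_end with
  | nil => simp [pvGroupEnd]
  | cons p t ih =>
    obtain ⟨s, e⟩ := p
    simp only [pvGroupEnd]
    split
    · exact le_trans (ih e) (by simp)
    · simp

-- B's outer loop: emit one group, recurse on what is left.
def merge_small_lines_alt (line_indexes : List (Int × Int)) (height_threshold : Int) : List (Int × Int) :=
  match line_indexes with
  | [] => []
  | (s, e) :: t =>
    let g := pvGroupEnd height_threshold s e t
    (s, g.1) :: merge_small_lines_alt g.2 height_threshold
termination_by line_indexes.length
decreasing_by
  exact Nat.lt_succ_of_le (pvGroupEnd_len height_threshold s e t)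

-- ===== PRECONDITION & SPEC =====
def Spec_merge_small_lines (line_indexes : List (Int × Int)) (height_threshold : Int) (out : List (Int × Int)) : Prop := out = merge_small_lines_alt line_indexes height_threshold
instance (line_indexes : List (Int × Int)) (height_threshold : Int) (out : List (Int × Int)) : Decidable (Spec_merge_small_lines line_indexes height_threshold out) := by unfold Spec_merge_small_lines; infer_instance

-- ===== CLAIM (what is proved, stated in full; the proofs are below) =====
def Claim_equal_merge_small_lines : Prop := ∀ (line_indexes : List (Int × Int)) (height_threshold : Int), Dom_merge_small_lines line_indexes height_threshold → Spec_merge_small_lines line_indexes height_threshold (merge_small_lines line_indexes height_threshold)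

-- ===== LEMMAS AND PROOFS =====

-- Invariant: A's fold over rest starting from state (merged, cs, ce), followed by the final
-- flush, equals merged ++ the B result of the group starting at (cs, ce) and the groups after.
theorem msl_invariant (h : Int) (rest : List (Int × Int)) :
    ∀ (merged : List (Int × Int)) (cs ce : Int),
    (let st := rest.foldl (fun (st : List (Int × Int) × Int × Int) next =>
        if st.2.2 - st.2.1 < h ∨ next.1 - st.2.2 < 5 then
          (st.1, st.2.1, next.2)
        else
          (st.1 ++ [(st.2.1, st.2.2)], next.1, next.2)) (merged, cs, ce)
     st.1 ++ [(st.2.1, st.2.2)])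
    =
    (merged ++ ((cs, (pvGroupEnd h cs ce rest).1) ::
        merge_small_lines_alt (pvGroupEnd h cs ce rest).2 h)) := by
  induction rest with
  | nil => intro merged cs ce; simp [pvGroupEnd, merge_small_lines_alt]
  | cons p t ih =>
    intro merged cs ce
    obtain ⟨s, e⟩ := p
    by_cases hc : ce - cs < h ∨ s - ce < 5
    · simp only [List.foldl_cons, pvGroupEnd, if_pos hc]
      exact ih merged cs e
    · simp only [List.foldl_cons, pvGroupEnd, if_neg hc]
      have := ih (merged ++ [(cs, ce)]) s e
      simp only [List.append_assoc] at this ⊢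
      rw [this]
      simp [merge_small_lines_alt]

-- ===== VERDICT (by name: the statement is the Claim_ definition above) =====
theorem merge_small_lines_spec : Claim_equal_merge_small_lines := by
  intro line_indexes h _
  unfold Spec_merge_small_lines
  cases line_indexes with
  | nil => simp [merge_small_lines, merge_small_lines_alt]
  | cons p rest =>
    obtain ⟨s, e⟩ := p
    show (merge_small_lines ((s, e) :: rest) h) = _
    unfold merge_small_lines
    rw [merge_small_lines_alt]
    simpa using msl_invariant h rest [] s e
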